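-- pv_equiv track=rewrite | github.com/SeisSol/PSpaMM | pspamm/scripts/max_bn_knl.py | getBlocksize
-- ===== SOURCE A (Python) =====
-- def getBlocksize(m, n, bk, v_size=8):
--
-- 	bm = v_size
-- 	bn = 1
--
-- 	for j in range(1, n+1):
-- 		if KNL_condition(bm, j, bk, v_size):
-- 			bn = j
--
-- 	while KNL_condition(bm, bn, bk+1, v_size):
-- 		bk += 1
--
-- 	return (bm, bn, bk)
--
-- def KNL_condition(bm, bn, bk, v_size):
--     # ceiling division
--     vm = -(bm // -v_size)
--     return (bn+bk) * vm <= 32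
-- ===== SOURCE B (Python) =====
-- def getBlocksize(m, n, bk, v_size=8):
--     # closed form: the KNL capacity condition reduces to bn + bk <= 32
--     bn = max(1, min(n, 32 - bk))
--     return (v_size, bn, max(bk, 32 - bn))
-- ===== Notes on version B (the rewrite author's own statement) =====
-- stated objective: faster
-- what changed: The linear scan over range(1,n+1) and the incrementing while loop are replaced by the closed forms bn = max(1, min(n, 32-bk)) and bk = max(bk, 32-bn), using that ceil(v_size/v_size) = 1 so the KNL condition is just bn+bk <= 32.
import Mathlib
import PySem

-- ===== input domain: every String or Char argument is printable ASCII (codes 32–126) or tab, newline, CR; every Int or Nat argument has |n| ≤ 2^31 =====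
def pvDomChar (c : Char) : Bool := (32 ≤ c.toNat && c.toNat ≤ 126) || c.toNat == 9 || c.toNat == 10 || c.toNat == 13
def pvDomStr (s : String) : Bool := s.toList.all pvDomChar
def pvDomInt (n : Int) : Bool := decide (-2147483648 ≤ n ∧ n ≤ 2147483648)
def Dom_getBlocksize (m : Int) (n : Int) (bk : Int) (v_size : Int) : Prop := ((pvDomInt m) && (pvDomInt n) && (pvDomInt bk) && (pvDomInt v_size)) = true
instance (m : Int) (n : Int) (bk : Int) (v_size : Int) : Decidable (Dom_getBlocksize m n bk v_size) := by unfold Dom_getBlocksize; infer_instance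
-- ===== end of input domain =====

-- B replaces A's O(n) scan and incrementing while-loop by closed-form min/max arithmetic (faster, asymptotic); Pre_ excludes v_size = 0, where A raises ZeroDivisionError.


-- ===== PORT A =====
def KNL_condition (bm : Int) (bn : Int) (bk : Int) (v_size : Int) : Bool :=
  -- vm = -(bm // -v_size)  (ceiling division); Pre_ keeps v_size ≠ 0 where Python raises
  let vm := -(PySem.Int.floordiv bm (-v_size))
  decide ((bn + bk) * vm ≤ 32)

-- the 'while KNL_condition(bm, bn, bk+1, v_size): bk += 1' loop; fuel only makes it total
def knlWhileA (bm : Int) (bn : Int) (v_size : Int) : Nat → Int → Int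
  | 0, bk => bk
  | f + 1, bk =>
      if KNL_condition bm bn (bk + 1) v_size then knlWhileA bm bn v_size f (bk + 1) else bk

def getBlocksize (m : Int) (n : Int) (bk : Int) (v_size : Int) : List Int :=
  let bm := v_size
  let bn := (PySem.List.pyRange 1 (n + 1) 1).foldl
      (fun bn j => if KNL_condition bm j bk v_size then j else bn) 1
  let bk' := knlWhileA bm bn v_size (32 - bn - bk).toNat bk
  [bm, bn, bk']

-- ===== PORT B =====
def getBlocksize_alt (m : Int) (n : Int) (bk : Int) (v_size : Int) : List Int :=
  let bn := max 1 (min n (32 - bk))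
  [v_size, bn, max bk (32 - bn)]

-- ===== PRECONDITION & SPEC =====
-- Pre_ excludes exactly v_size = 0, on which Python A raises ZeroDivisionError in KNL_condition.
def Pre_getBlocksize (m : Int) (n : Int) (bk : Int) (v_size : Int) : Prop := v_size ≠ 0
instance (m : Int) (n : Int) (bk : Int) (v_size : Int) : Decidable (Pre_getBlocksize m n bk v_size) := by unfold Pre_getBlocksize; infer_instance
def pvWitness_getBlocksize : Int × Int × Int × Int := (4, 10, 2, 8)

def Spec_getBlocksize (m : Int) (n : Int) (bk : Int) (v_size : Int) (out : List Int) : Prop := out = getBlocksize_alt m n bk v_size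
instance (m : Int) (n : Int) (bk : Int) (v_size : Int) (out : List Int) : Decidable (Spec_getBlocksize m n bk v_size out) := by unfold Spec_getBlocksize; infer_instance

-- ===== CLAIM (what is proved, stated in full; the proofs are below) =====
def Claim_equal_getBlocksize : Prop := ∀ (m : Int) (n : Int) (bk : Int) (v_size : Int), Dom_getBlocksize m n bk v_size → Pre_getBlocksize m n bk v_size → Spec_getBlocksize m n bk v_size (getBlocksize m n bk v_size)
-- ===== LEMMAS AND PROOFS =====

-- for v_size ≠ 0, the ceiling division in KNL_condition is 1, so the condition is bn + bk ≤ 32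
theorem KNL_condition_eq (bn bk v_size : Int) (h : v_size ≠ 0) :
    KNL_condition v_size bn bk v_size = decide (bn + bk ≤ 32) := by
  have hdiv : PySem.Int.floordiv v_size (-v_size) = -1 := by
    rcases lt_or_gt_of_ne h with hv | hv
    · exact (PySem.Int.floordiv_eq_iff_of_pos (by omega)).2 ⟨by nlinarith, by nlinarith⟩
    · have hnn := PySem.Int.floordiv_neg_neg (-v_size) v_size
      simp only [neg_neg] at hnn
      rw [hnn]
      exact (PySem.Int.floordiv_eq_iff_of_pos (by omega)).2 ⟨by nlinarith, by nlinarith⟩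
  simp [KNL_condition, hdiv, mul_one]

theorem fold_bn_aux (bk v_size : Int) (h : v_size ≠ 0) :
    ∀ n : Int, 0 ≤ n →
    (PySem.List.pyRange 1 (n + 1) 1).foldl
      (fun bn j => if KNL_condition v_size j bk v_size then j else bn) 1
    = max 1 (min n (32 - bk)) := by
  refine Int.le_induction ?_ ?_
  · rw [PySem.List.pyRange_one_eq_nil (by omega)]
    simp only [List.foldl_nil]; omega
  · intro n hn ih
    rw [PySem.List.pyRange_one_succ_right (by omega), List.foldl_append, ih]
    simp only [List.foldl_cons, List.foldl_nil, KNL_condition_eq _ _ _ h, decide_eq_true_eq]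
    split_ifs with hc <;> omega

theorem fold_bn_eq (n bk v_size : Int) (h : v_size ≠ 0) :
    (PySem.List.pyRange 1 (n + 1) 1).foldl
      (fun bn j => if KNL_condition v_size j bk v_size then j else bn) 1
    = max 1 (min n (32 - bk)) := by
  by_cases hn : 0 ≤ n
  · exact fold_bn_aux bk v_size h n hn
  · rw [PySem.List.pyRange_one_eq_nil (by omega)]
    simp; omega

theorem while_eq (bn bk v_size : Int) (h : v_size ≠ 0) (f : Nat) (hf : f = (32 - bn - bk).toNat) :
    knlWhileA v_size bn v_size f bk = max bk (32 - bn) := by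
  induction f generalizing bk with
  | zero =>
      simp [knlWhileA]; omega
  | succ f ih =>
      rw [knlWhileA, KNL_condition_eq _ _ _ h]
      have hc : bn + (bk + 1) ≤ 32 := by omega
      simp only [hc, decide_true, if_true]
      rw [ih (bk + 1) (by omega)]
      omega

-- ===== VERDICT (by name: the statement is the Claim_ definition above) =====
theorem getBlocksize_spec : Claim_equal_getBlocksize := by
  intro m n bk v_size _ hpre
  show _ = _
  unfold getBlocksize getBlocksize_alt
  simp only [fold_bn_eq n bk v_size hpre]
  rw [while_eq _ _ _ hpre _ rfl]
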